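-- pv_equiv track=rewrite | github.com/wodus1035/2025_GTra | src/gutils.py | group_cell_type_trajectory
-- ===== SOURCE A (Python) =====
-- def group_cell_type_trajectory(net_info):
--     merge_path_dict = {}
--     for path in net_info:
--         cell_type_path = [node[:node.rfind('_')] for node in path]
--         key = tuple(cell_type_path)
--
--         if merge_path_dict.get(key) is None:
--             merge_path_dict[key] = [path]
--         else:
--             merge_path_dict[key].append(path)
--
--     return merge_path_dict
-- ===== SOURCE B (Python) =====
-- def group_cell_type_trajectory(net_info):
--     # Two-pass grouping: pair each path with its cell-type key, collect key order
--     # of first occurrence, then gather each group by a per-key scan.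
--     keyed = [(tuple(node[:node.rfind('_')] for node in path), path) for path in net_info]
--     order = list(dict.fromkeys(k for k, _ in keyed))
--     return {k: [p for kk, p in keyed if kk == k] for k in order}
-- ===== Notes on version B (the rewrite author's own statement) =====
-- stated objective: alternative
-- what changed: Replaces the single hash-bucketing pass (dict.get then insert/append) by a two-pass decomposition: precompute (key, path) pairs, dedup the keys in first-occurrence order, then build each group by a per-key filter scan.
import Mathlib
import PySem

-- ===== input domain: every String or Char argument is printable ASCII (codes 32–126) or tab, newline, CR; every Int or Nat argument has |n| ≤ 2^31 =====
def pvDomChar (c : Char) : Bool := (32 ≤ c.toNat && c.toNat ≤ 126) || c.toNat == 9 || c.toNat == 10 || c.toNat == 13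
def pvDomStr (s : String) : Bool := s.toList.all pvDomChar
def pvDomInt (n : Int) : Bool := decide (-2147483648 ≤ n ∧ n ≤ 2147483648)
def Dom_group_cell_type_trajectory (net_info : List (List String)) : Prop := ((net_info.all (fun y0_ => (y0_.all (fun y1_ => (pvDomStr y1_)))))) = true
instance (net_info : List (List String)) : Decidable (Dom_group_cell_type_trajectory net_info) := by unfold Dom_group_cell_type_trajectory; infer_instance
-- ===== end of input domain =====

-- ===== PORT A =====
-- B groups by a key-pairing / ordered-dedup / per-key-filter decomposition instead of A's single hash-bucketing pass (objective: alternative).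
-- node[:node.rfind('_')]
def pvKeyOf (node : String) : String :=
  PySem.Str.slice node none (some (PySem.Str.rfind node "_"))

-- loop body of A: look up the key; absent -> start a new bucket, present -> append
def pvStepA (d : PySem.Dict (List String) (List (List String))) (path : List String) :
    PySem.Dict (List String) (List (List String)) :=
  let key := path.map pvKeyOf
  match d.get? key with
  | none => d.insert key [path]
  | some v => d.insert key (v ++ [path])

def group_cell_type_trajectory (net_info : List (List String)) :
    List (List String × List (List String)) :=
  (net_info.foldl pvStepA PySem.Dict.empty).items

-- ===== PORT B =====
def group_cell_type_trajectory_alt (net_info : List (List String)) :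
    List (List String × List (List String)) :=
  let keyed := net_info.map (fun path => (path.map pvKeyOf, path))
  let order := PySem.List.dedup (keyed.map (fun kp => kp.1))
  order.map (fun k => (k, (keyed.filter (fun kp => kp.1 == k)).map (fun kp => kp.2)))

-- ===== PRECONDITION & SPEC =====
def Spec_group_cell_type_trajectory (net_info : List (List String)) (out : List (List String × List (List String))) : Prop := out = group_cell_type_trajectory_alt net_info
instance (net_info : List (List String)) (out : List (List String × List (List String))) : Decidable (Spec_group_cell_type_trajectory net_info out) := by unfold Spec_group_cell_type_trajectory; infer_instance

-- ===== CLAIM (what is proved, stated in full; the proofs are below) =====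
def Claim_equal_group_cell_type_trajectory : Prop := ∀ (net_info : List (List String)), Dom_group_cell_type_trajectory net_info → Spec_group_cell_type_trajectory net_info (group_cell_type_trajectory net_info)

-- ===== LEMMAS AND PROOFS =====
-- A's branch on get? is exactly Python's d[key] = d.get(key, []) + [path], i.e. Dict.modify.
theorem pvStepA_eq_modify (d : PySem.Dict (List String) (List (List String))) (path : List String) :
    pvStepA d path = d.modify (path.map pvKeyOf) [] (fun v => v ++ [path]) := by
  unfold pvStepA
  cases h : d.get? (path.map pvKeyOf) with
  | none =>
      simp [PySem.Dict.modify, PySem.Dict.getD_eq_get?_getD, h]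
  | some v =>
      simp [PySem.Dict.modify, PySem.Dict.getD_eq_get?_getD, h]

-- A's whole loop, rewritten over the (key, path) pairs B precomputes.
theorem pvLoopA_eq (net_info : List (List String)) :
    net_info.foldl pvStepA PySem.Dict.empty
      = (net_info.map (fun path => (path.map pvKeyOf, path))).foldl
          (fun d p => d.modify p.1 [] (fun v => v ++ [p.2])) PySem.Dict.empty := by
  rw [List.foldl_map]
  simp only [funext fun d => funext fun path => pvStepA_eq_modify d path]

theorem group_cell_type_trajectory_spec : Claim_equal_group_cell_type_trajectory := by
  intro net_info _
  unfold Spec_group_cell_type_trajectory group_cell_type_trajectory group_cell_type_trajectory_alt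
  rw [pvLoopA_eq]
  set keyed := net_info.map (fun path => (path.map pvKeyOf, path)) with hkeyed
  have hnd : ((keyed.foldl (fun d p => d.modify p.1 [] (fun v => v ++ [p.2])) PySem.Dict.empty)).keys.Nodup := by
    exact PySem.Dict.nodup_keys_foldl_modify_key keyed (fun p => p.1) [] (fun _ p v => v ++ [p.2]) _ (by simp)
  rw [PySem.Dict.items_eq_map_keys _ hnd []]
  have hkeys : ((keyed.foldl (fun d p => d.modify p.1 [] (fun v => v ++ [p.2])) PySem.Dict.empty)).keys
      = PySem.List.dedup (keyed.map (fun kp => kp.1)) := by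
    rw [PySem.Dict.keys_foldl_modify_key keyed (fun p => p.1) [] (fun _ p v => v ++ [p.2])]
    simp [PySem.Set.update_nil_left, PySem.List.dedup_eq_ofList]
  rw [hkeys]
  refine List.map_congr_left (fun k _ => ?_)
  rw [PySem.Dict.getD_foldl_modify_append keyed PySem.Dict.empty k]
  simp
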